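-- pv_equiv track=rewrite | github.com/ZhangZhen-Naoc/lcgmt | lcgmt_frontend/app/simulator/service.py | extract_filelist_from_readme
-- ===== SOURCE A (Python) =====
-- from typing import Dict, List
--
-- def extract_filelist_from_readme(readme_content:str)->List[str]:
--     """从readme文件返回文件列表
--
--     Args:
--         readme_content (str): 文件名，每行内容遵循“ 文件名：描述”的格式
--
--     Returns:
--         List[str]: _description_
--     """
--     lines = readme_content.split("\n")
--     filelist = []
--     for line in lines:
--         valid =  line.find(":") !=-1
--         if valid:
--             filelist.append(line.split(":")[0])
--     filelist.append("readme.txt")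
--     return filelist
-- ===== SOURCE B (Python) =====
-- from typing import List
--
--
-- def extract_filelist_from_readme(readme_content: str) -> List[str]:
--     """Single character-level scan: collect each line's text before its first
--     colon while walking the string once, instead of splitting into lines and
--     re-scanning each line twice (find + split)."""
--     filelist: List[str] = []
--     buf: List[str] = []
--     seen = False
--     for ch in readme_content:
--         if ch == "\n":
--             if seen:
--                 filelist.append("".join(buf))
--             buf = []
--             seen = False
--         elif not seen:
--             if ch == ":":
--                 seen = True
--             else:
--                 buf.append(ch)
--     if seen:
--         filelist.append("".join(buf))
--     filelist.append("readme.txt")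
--     return filelist
-- ===== Notes on version B (the rewrite author's own statement) =====
-- stated objective: alternative
-- what changed: Replaces split-into-lines plus per-line find/split parsing by a single one-pass character state machine (current-prefix buffer + seen-colon flag) over the whole string.
import Mathlib
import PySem

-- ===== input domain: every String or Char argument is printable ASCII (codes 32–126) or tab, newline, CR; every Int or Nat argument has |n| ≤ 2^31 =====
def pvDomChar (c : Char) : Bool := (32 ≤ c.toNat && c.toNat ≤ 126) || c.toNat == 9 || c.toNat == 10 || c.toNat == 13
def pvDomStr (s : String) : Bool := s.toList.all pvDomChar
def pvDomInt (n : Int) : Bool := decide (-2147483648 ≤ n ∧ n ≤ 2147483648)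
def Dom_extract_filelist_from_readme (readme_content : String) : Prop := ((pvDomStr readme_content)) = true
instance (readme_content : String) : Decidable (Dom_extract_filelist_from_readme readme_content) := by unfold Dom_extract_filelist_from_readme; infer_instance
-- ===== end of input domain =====

-- B replaces line-splitting plus per-line find/split parsing by a single one-pass character
-- state machine over the whole string; same return value, not claimed faster.

-- ===== PORT A =====
-- Literal port of A on the Char-list side (PySem.Str.* are thin wrappers over PySem.Chars.*).
-- split("\n") / split(":") have sep ≠ "", so split? is always `some`, and a split result is never
-- empty so `[0]` always exists: the `.getD []` / `.headD []` defaults are unreachable.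
def extract_filelist_from_readme (readme_content : String) : List String :=
  let lines := (PySem.Chars.split? readme_content.toList ['\n']).getD []
  let filelist := lines.foldl
    (fun acc line =>
      if PySem.Chars.find line [':'] ≠ -1 then
        acc ++ [String.mk (((PySem.Chars.split? line [':']).getD []).headD [])]
      else acc) []
  filelist ++ ["readme.txt"]

-- ===== PORT B =====
-- State of B's scan: (filelist, buf, seen) — output so far, current line's pre-colon buffer, colon-seen flag.
def pvStepB (st : List String × List Char × Bool) (ch : Char) : List String × List Char × Bool :=
  if ch = '\n' then
    ((if st.2.2 then st.1 ++ [String.mk st.2.1] else st.1), [], false)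
  else if st.2.2 then st
  else if ch = ':' then (st.1, st.2.1, true)
  else (st.1, st.2.1 ++ [ch], false)

def extract_filelist_from_readme_alt (readme_content : String) : List String :=
  let st := readme_content.toList.foldl pvStepB ([], [], false)
  (if st.2.2 then st.1 ++ [String.mk st.2.1] else st.1) ++ ["readme.txt"]

-- ===== PRECONDITION & SPEC =====
def Spec_extract_filelist_from_readme (readme_content : String) (out : List String) : Prop := out = extract_filelist_from_readme_alt readme_content
instance (readme_content : String) (out : List String) : Decidable (Spec_extract_filelist_from_readme readme_content out) := by unfold Spec_extract_filelist_from_readme; infer_instance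

-- ===== CLAIM (what is proved, stated in full; the proofs are below) =====
def Claim_equal_extract_filelist_from_readme : Prop := ∀ (readme_content : String), Dom_extract_filelist_from_readme readme_content → Spec_extract_filelist_from_readme readme_content (extract_filelist_from_readme readme_content)

-- ===== LEMMAS AND PROOFS =====

-- Pure characterisation of Python's split on a single-character separator.
def splitC (c : Char) (l : List Char) : List (List Char) :=
  l.takeWhile (· ≠ c) ::
    (if h : c ∈ l then splitC c ((l.dropWhile (· ≠ c)).drop 1) else [])
termination_by l.length
decreasing_by
  have hne : l.dropWhile (· ≠ c) ≠ [] := by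
    intro hnil
    have := (List.dropWhile_eq_nil_iff).mp hnil c h
    simp at this
  have h1 : (l.dropWhile (· ≠ c)).length ≤ l.length := List.length_dropWhile_le _ _
  have h2 : 0 < (l.dropWhile (· ≠ c)).length := List.length_pos_iff.mpr hne
  simp only [ne_eq] at h1 h2 ⊢
  simp only [List.length_drop]
  omega

lemma go_single_spec (c : Char) :
    ∀ (fuel : Nat) (l cur : List Char) (hacc : List (List Char)),
      l.length < fuel →
      PySem.Chars.splitOn.go [c] fuel l cur hacc =
        hacc.reverse ++ (cur.reverse ++ l.takeWhile (· ≠ c)) ::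
          (if c ∈ l then splitC c ((l.dropWhile (· ≠ c)).drop 1) else []) := by
  intro fuel
  induction fuel with
  | zero => intro l cur hacc h; omega
  | succ f ih =>
    intro l cur hacc h
    cases l with
    | nil => simp [PySem.Chars.splitOn.go]
    | cons a rest =>
      by_cases hac : a = c
      · subst hac
        rw [PySem.Chars.splitOn.go]
        simp only [List.isPrefixOf, BEq.rfl, Bool.and_eq_true, and_self, if_pos]
        simp only [List.length_cons, List.length_nil, Nat.zero_add, List.drop_succ_cons,
          List.drop_zero]
        rw [ih rest [] (cur.reverse :: hacc) (by simp at h ⊢; omega)]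
        conv_rhs => rw [splitC]
        simp [List.dropWhile]
      · rw [PySem.Chars.splitOn.go]
        have hpre : [c].isPrefixOf (a :: rest) = false := by
          simp [List.isPrefixOf]; exact fun hc => absurd hc.symm hac
        rw [hpre]
        simp only [Bool.false_eq_true, if_false]
        rw [ih rest (a :: cur) hacc (by simp at h ⊢; omega)]
        simp [hac, Ne.symm hac, List.dropWhile]

lemma splitOn_single (c : Char) (l : List Char) :
    PySem.Chars.splitOn l [c] = splitC c l := by
  rw [PySem.Chars.splitOn, go_single_spec c (l.length + 1) l [] [] (by omega)]
  conv_rhs => rw [splitC]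
  simp

lemma split?_single (c : Char) (l : List Char) :
    PySem.Chars.split? l [c] = some (splitC c l) := by
  simp [PySem.Chars.split?, splitOn_single]

lemma splitC_head? (c : Char) (l : List Char) :
    (splitC c l).head? = some (l.takeWhile (· ≠ c)) := by
  rw [splitC]; rfl

-- Middle layer: the shared per-line result, computed by direct recursion on the characters.
def aChars (buf : List Char) (seen : Bool) : List Char → List String
  | [] => if seen then [String.mk buf] else []
  | ch :: cs =>
    if ch = '\n' then (if seen then [String.mk buf] else []) ++ aChars [] false cs
    else if seen then aChars buf true cs
    else if ch = ':' then aChars buf true cs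
    else aChars (buf ++ [ch]) false cs

lemma aChars_true (buf : List Char) :
    ∀ cs, aChars buf true cs =
      String.mk buf ::
        (if '\n' ∈ cs then aChars [] false ((cs.dropWhile (· ≠ '\n')).drop 1) else []) := by
  intro cs
  induction cs with
  | nil => simp [aChars]
  | cons ch cs ih =>
    by_cases hn : ch = '\n'
    · subst hn; simp [aChars, List.dropWhile]
    · simp [aChars, hn, ih, Ne.symm hn, List.dropWhile]

lemma aChars_false (cs : List Char) : ∀ (buf : List Char),
    aChars buf false cs =
      (if ':' ∈ cs.takeWhile (· ≠ '\n') then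
        [String.mk (buf ++ (cs.takeWhile (· ≠ '\n')).takeWhile (· ≠ ':'))] else []) ++
      (if '\n' ∈ cs then aChars [] false ((cs.dropWhile (· ≠ '\n')).drop 1) else []) := by
  induction cs with
  | nil => intro buf; simp [aChars]
  | cons ch cs ih =>
    intro buf
    by_cases hn : ch = '\n'
    · subst hn; simp [aChars, List.dropWhile]
    · by_cases hc : ch = ':'
      · subst hc
        simp [aChars, hn, aChars_true, Ne.symm hn, List.dropWhile]
      · simp [aChars, hn, hc, ih, Ne.symm hn, Ne.symm hc, List.dropWhile]

lemma foldA_eq (cs : List Char) : ∀ (acc : List String),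
    (splitC '\n' cs).foldl
      (fun acc line =>
        if PySem.Chars.find line [':'] ≠ -1 then
          acc ++ [String.mk ((splitC ':' line).headD [])]
        else acc) acc
      = acc ++ aChars [] false cs := by
  induction cs using splitC.induct '\n' with
  | _ l ih =>
    intro acc
    conv_lhs => rw [splitC]
    rw [aChars_false]
    by_cases hmem : '\n' ∈ l
    · rw [dif_pos hmem, if_pos hmem, List.foldl_cons, ih hmem]
      by_cases hcol : ':' ∈ l.takeWhile (fun x => !decide (x = '\n'))
      · have hfind : PySem.Chars.find (l.takeWhile (fun x => !decide (x = '\n'))) [':'] ≠ -1 := by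
          rw [PySem.Chars.find_ne_neg_one_iff]
          exact ((List.singleton_infix_iff _ _).mpr hcol)
        simp [hfind, hcol, splitC_head?]
      · have hfind : PySem.Chars.find (l.takeWhile (fun x => !decide (x = '\n'))) [':'] = -1 := by
          rw [PySem.Chars.find_eq_neg_one_iff]
          intro hinf
          exact hcol ((List.singleton_infix_iff _ _).mp hinf)
        simp [hfind, hcol]
    · have htake : l.takeWhile (· ≠ '\n') = l := by
        rw [List.takeWhile_eq_self_iff]
        intro x hx
        simp
        rintro rfl
        exact hmem hx
      rw [dif_neg hmem, if_neg hmem, List.foldl_cons, List.foldl_nil, htake]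
      by_cases hcol : ':' ∈ l
      · have hfind : PySem.Chars.find l [':'] ≠ -1 := by
          rw [PySem.Chars.find_ne_neg_one_iff]
          exact ((List.singleton_infix_iff _ _).mpr hcol)
        simp [hfind, hcol, splitC_head?]
      · have hfind : PySem.Chars.find l [':'] = -1 := by
          rw [PySem.Chars.find_eq_neg_one_iff]
          intro hinf
          exact hcol ((List.singleton_infix_iff _ _).mp hinf)
        simp [hfind, hcol]

lemma foldB_eq (cs : List Char) :
    ∀ (result : List String) (buf : List Char) (seen : Bool),
      (if (cs.foldl pvStepB (result, buf, seen)).2.2 then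
        (cs.foldl pvStepB (result, buf, seen)).1 ++
          [String.mk (cs.foldl pvStepB (result, buf, seen)).2.1]
      else (cs.foldl pvStepB (result, buf, seen)).1) =
        result ++ aChars buf seen cs := by
  induction cs with
  | nil => intro result buf seen; cases seen <;> simp [aChars]
  | cons ch cs ih =>
    intro result buf seen
    by_cases hn : ch = '\n'
    · subst hn
      cases seen <;> simp [pvStepB, aChars, ih]
    · by_cases hs : seen
      · subst hs
        simp [pvStepB, hn, aChars, ih]
      · simp only [Bool.not_eq_true] at hs; subst hs
        by_cases hc : ch = ':'
        · subst hc
          simp [pvStepB, aChars, ih]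
        · simp [pvStepB, hn, hc, aChars, ih]

-- ===== VERDICT (by name: the statement is the Claim_ definition above) =====
theorem extract_filelist_from_readme_spec : Claim_equal_extract_filelist_from_readme := by
  intro s _
  unfold Spec_extract_filelist_from_readme extract_filelist_from_readme extract_filelist_from_readme_alt
  simp only [split?_single, Option.getD_some]
  rw [foldA_eq]
  rw [foldB_eq s.toList [] [] false]
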